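-- pv_equiv track=rewrite | github.com/luzalbaposse/TD-1-IntroduccionALaProgramacion | Material/clases-practicas/P05-repaso1-continuacion/P05-src/traductor_jeringoso_bib.py | traducir_a_jeringoso
-- ===== SOURCE A (Python) =====
-- def es_vocal(c:str) -> bool:
--   '''
--   Determina si un carácter corresponde a una vocal.
--   Requiere: len(c) == 1.
--   Devuelve: True si c es una vocal en mayúcula o minúscula y False en caso contrario.
--   '''
--   res:bool = (c=='a' or c=='e' or c=='i' or c=='o' or c=='u' or
--              c=='A' or c=='E' or c=='I' or c=='O' or c=='U')
--   return res
--
-- def traducir_a_jeringoso(texto:str) -> str: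
--   '''
--   Requiere: texto no contiene tildes.
--   Devuelve: la traducción de texto a jeringoso.
--   '''
--   res:str = ''
--   i:int = 0
--   while i < len(texto):
--     letra_actual:str = texto[i]
--     res = res + letra_actual
--     if es_vocal(letra_actual):
--       res = res + 'p' + letra_actual.lower()
--     i = i + 1
--   return res
-- ===== SOURCE B (Python) =====
-- # Table-driven: each vowel's replacement is precomputed once; str.translate does the
-- # substitution in a single C-level call (no explicit loop, index or branch in Python).
-- _TABLA_JERINGOSO = str.maketrans({v: v + 'p' + v.lower() for v in 'aeiouAEIOU'})
--
-- def traducir_a_jeringoso(texto: str) -> str: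
--   '''
--   Devuelve: la traducción de texto a jeringoso.
--   '''
--   return texto.translate(_TABLA_JERINGOSO)
-- ===== Notes on version B (the rewrite author's own statement) =====
-- stated objective: faster
-- what changed: Replaces A's index-driven while loop with accumulator string concatenation and a per-character vowel test by a translation table built once (str.maketrans mapping each vowel to its precomputed expansion) applied with a single str.translate call.
import Mathlib
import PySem

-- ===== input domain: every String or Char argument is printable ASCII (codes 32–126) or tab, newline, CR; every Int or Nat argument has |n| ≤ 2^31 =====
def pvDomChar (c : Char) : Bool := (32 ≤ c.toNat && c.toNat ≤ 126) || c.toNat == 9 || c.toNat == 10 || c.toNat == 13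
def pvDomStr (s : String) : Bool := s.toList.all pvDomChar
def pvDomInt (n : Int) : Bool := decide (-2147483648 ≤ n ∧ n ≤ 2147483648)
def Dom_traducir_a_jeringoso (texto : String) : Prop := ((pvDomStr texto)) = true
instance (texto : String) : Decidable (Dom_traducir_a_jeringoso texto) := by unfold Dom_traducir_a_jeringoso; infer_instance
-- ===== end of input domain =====

-- B replaces A's while loop, index, vowel test and accumulator concatenation by a
-- translation table built once and applied with a single translate pass (idiomatic).

-- ===== PORT A =====
-- es_vocal takes the one-character string texto[i]; ported on Char (exact, since
-- Python's one-char strings here correspond to the chars of texto).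
def es_vocal (c : Char) : Bool :=
  (c = 'a' || c = 'e' || c = 'i' || c = 'o' || c = 'u' ||
   c = 'A' || c = 'E' || c = 'I' || c = 'O' || c = 'U')

-- A's while loop: i walks texto left to right, res accumulates; texto[i] sequentially is
-- the traversal of texto's chars, and letra_actual.lower() is Char.toLower (exact on ASCII).
def pvLoopA : List Char → String → String
  | [], res => res
  | letra :: rest, res =>
      let res' := res ++ String.ofList [letra]
      pvLoopA rest (if es_vocal letra then res' ++ "p" ++ String.ofList [letra.toLower] else res')

def traducir_a_jeringoso (texto : String) : String :=
  pvLoopA texto.toList ""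

-- ===== PORT B =====
-- Source B's translation table _TABLA_JERINGOSO (str.maketrans of a 10-entry dict whose
-- values are the precomputed expansions v + 'p' + v.lower()); ported keyed on Char.
def pvTablaJeringoso : PySem.Dict Char String :=
  PySem.Dict.ofList [('a', "apa"), ('e', "epe"), ('i', "ipi"), ('o', "opo"), ('u', "upu"),
                     ('A', "Apa"), ('E', "Epe"), ('I', "Ipi"), ('O', "Opo"), ('U', "Upu")]

-- str.translate: each char is replaced by its table entry if present, kept otherwise.
def traducir_a_jeringoso_alt (texto : String) : String :=
  String.ofList (texto.toList.flatMap (fun c =>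
    match pvTablaJeringoso.get? c with
    | some s => s.toList
    | none => [c]))

-- ===== PRECONDITION & SPEC =====
def Spec_traducir_a_jeringoso (texto : String) (out : String) : Prop := out = traducir_a_jeringoso_alt texto
instance (texto : String) (out : String) : Decidable (Spec_traducir_a_jeringoso texto out) := by unfold Spec_traducir_a_jeringoso; infer_instance

-- ===== CLAIM (what is proved, stated in full; the proofs are below) =====
def Claim_equal_traducir_a_jeringoso : Prop := ∀ (texto : String), Dom_traducir_a_jeringoso texto → Spec_traducir_a_jeringoso texto (traducir_a_jeringoso texto)

-- ===== LEMMAS AND PROOFS =====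

-- Per-character agreement: A's vowel branch produces exactly B's table entry.
theorem step_eq (c : Char) :
    (if es_vocal c then [c, 'p', c.toLower] else [c]) =
      (match pvTablaJeringoso.get? c with
       | some s => s.toList
       | none => [c]) := by
  by_cases ha : c = 'a'
  · subst ha; decide
  by_cases he : c = 'e'
  · subst he; decide
  by_cases hi : c = 'i'
  · subst hi; decide
  by_cases ho : c = 'o'
  · subst ho; decide
  by_cases hu : c = 'u'
  · subst hu; decide
  by_cases hA : c = 'A'
  · subst hA; decide
  by_cases hE : c = 'E'
  · subst hE; decide
  by_cases hI : c = 'I'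
  · subst hI; decide
  by_cases hO : c = 'O'
  · subst hO; decide
  by_cases hU : c = 'U'
  · subst hU; decide
  have hv : es_vocal c = false := by
    simp [es_vocal, ha, he, hi, ho, hu, hA, hE, hI, hO, hU]
  have hmk : pvTablaJeringoso = PySem.Dict.mk
      [('a', "apa"), ('e', "epe"), ('i', "ipi"), ('o', "opo"), ('u', "upu"),
       ('A', "Apa"), ('E', "Epe"), ('I', "Ipi"), ('O', "Opo"), ('U', "Upu")] := by decide
  have hg : pvTablaJeringoso.get? c = none := by
    rw [hmk]
    simp [PySem.Dict.get?, PySem.Dict.get?_mk_cons, Ne.symm ha, Ne.symm he, Ne.symm hi, Ne.symm ho,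
          Ne.symm hu, Ne.symm hA, Ne.symm hE, Ne.symm hI, Ne.symm hO, Ne.symm hU]
  simp [hv, hg]

theorem pvLoopA_invariant (l : List Char) (res : String) :
    pvLoopA l res = res ++ String.ofList (l.flatMap (fun c =>
      match pvTablaJeringoso.get? c with
      | some s => s.toList
      | none => [c])) := by
  induction l generalizing res with
  | nil => simp [pvLoopA]
  | cons letra rest ih =>
      simp only [pvLoopA, ih, List.flatMap_cons, ← step_eq letra]
      by_cases h : es_vocal letra = true
      · simp only [h, if_pos]
        rw [← String.toList_inj]
        simp [String.toList_append]
      · simp only [h, Bool.false_eq_true, if_false]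
        rw [← String.toList_inj]
        simp [String.toList_append]

-- ===== VERDICT (by name: the statement is the Claim_ definition above) =====
theorem traducir_a_jeringoso_spec : Claim_equal_traducir_a_jeringoso := by
  intro texto _
  unfold Spec_traducir_a_jeringoso traducir_a_jeringoso traducir_a_jeringoso_alt
  rw [pvLoopA_invariant]
  rw [← String.toList_inj]
  simp
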